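-- pv_equiv track=rewrite | github.com/stevenwtolbert/erdos-710-analysis | experiments/fractional_matching/hpc_z99_fmc_true_alpha.py | greedy_adversarial_fast
-- ===== SOURCE A (Python) =====
-- def greedy_adversarial_fast(elements, adj, target_size):
--     """Fast greedy |NH|-minimizer."""
--     if not elements or target_size <= 0:
--         return []
--     T = []
--     covered = set()
--     remaining = list(elements)
--     # Sort by degree (ascending) as initial heuristic
--     remaining.sort(key=lambda k: len(adj.get(k, [])))
--
--     for _ in range(min(target_size, len(remaining))):
--         best_k = None
--         best_new = float('inf')
--         for k in remaining:
--             if k in set(T):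
--                 continue
--             new = sum(1 for m in adj.get(k, []) if m not in covered)
--             if new < best_new:
--                 best_new = new
--                 best_k = k
--         if best_k is None:
--             break
--         T.append(best_k)
--         remaining.remove(best_k)
--         for m in adj.get(best_k, []):
--             covered.add(m)
--     return T
-- ===== SOURCE B (Python) =====
-- def greedy_adversarial_fast(elements, adj, target_size):
--     """Same greedy |NH|-minimizer, with incremental new-coverage counts
--     maintained through a reverse vertex->element index (one touch per edge)."""
--     if not elements or target_size <= 0:
--         return []
--     # distinct candidates, in stable degree-ascending order
--     order = list(dict.fromkeys(sorted(elements, key=lambda k: len(adj.get(k, [])))))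
--     # current "newly covered" count of each candidate (with multiplicity)
--     cnt = {k: len(adj.get(k, [])) for k in order}
--     # reverse index: vertex -> candidates listing it (one entry per occurrence)
--     rev = {}
--     for k in order:
--         for m in adj.get(k, []):
--             rev.setdefault(m, []).append(k)
--     covered = set()
--     res = []
--     for _ in range(min(target_size, len(order))):
--         best = min(order, key=lambda k: cnt[k])
--         res.append(best)
--         order.remove(best)
--         for m in adj.get(best, []):
--             if m not in covered:
--                 covered.add(m)
--                 for k in rev[m]:
--                     cnt[k] -= 1
--     return res
-- ===== Notes on version B (the rewrite author's own statement) =====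
-- stated objective: faster
-- what changed: Instead of recomputing every candidate's uncovered-neighbour count from scratch in each greedy round, B deduplicates the sorted candidates once, builds a reverse vertex-to-candidate index, and maintains the counts incrementally (each adjacency entry is touched once when its vertex first becomes covered), picking each round's first minimum with min().
import Mathlib
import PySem

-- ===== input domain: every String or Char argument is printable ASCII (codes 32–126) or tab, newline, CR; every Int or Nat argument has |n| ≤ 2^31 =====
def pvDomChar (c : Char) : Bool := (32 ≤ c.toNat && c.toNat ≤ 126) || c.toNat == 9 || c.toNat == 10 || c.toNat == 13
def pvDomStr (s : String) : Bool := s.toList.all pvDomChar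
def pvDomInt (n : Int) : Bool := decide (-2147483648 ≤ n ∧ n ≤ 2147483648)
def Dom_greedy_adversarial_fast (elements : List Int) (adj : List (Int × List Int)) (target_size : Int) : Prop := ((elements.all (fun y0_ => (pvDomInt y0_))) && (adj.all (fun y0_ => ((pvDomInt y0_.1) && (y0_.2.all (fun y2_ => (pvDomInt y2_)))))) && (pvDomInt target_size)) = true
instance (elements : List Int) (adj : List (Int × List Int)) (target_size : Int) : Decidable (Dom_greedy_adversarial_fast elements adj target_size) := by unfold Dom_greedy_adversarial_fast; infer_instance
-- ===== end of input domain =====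

-- B replaces A's per-step recomputation of every candidate's uncovered-neighbour count by counts
-- maintained incrementally through a reverse vertex→candidate index (objective: faster).

-- ===== PORT A =====
-- adj.get(k, [])
def pvAdj (adj : List (Int × List Int)) (k : Int) : List Int :=
  PySem.Dict.getD (PySem.Dict.mk adj) k []

-- len(adj.get(k, [])), the sort key
def pvKey (adj : List (Int × List Int)) (k : Int) : Int :=
  ((pvAdj adj k).length : Int)

-- sum(1 for m in adj.get(k, []) if m not in covered)  (a 0/1-genexp sum IS countP)
def pvNew (adj : List (Int × List Int)) (covered : PySem.Set Int) (k : Int) : Int :=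
  (((pvAdj adj k).countP (fun m => !(PySem.Set.contains covered m))) : Int)

-- A's inner scan: best_k/best_new accumulator over `remaining`, skipping members of set(T)
def pvStepA (adj : List (Int × List Int)) (T : List Int) (covered : PySem.Set Int)
    (st : Option Int × Option Int) (k : Int) : Option Int × Option Int :=
  if PySem.Set.contains (PySem.Set.ofList T) k then st
  else match st with
    | (_, none) => (some k, some (pvNew adj covered k))
    | (bk, some bn) =>
        if pvNew adj covered k < bn then (some k, some (pvNew adj covered k)) else (bk, some bn)

def pvScanA (adj : List (Int × List Int)) (T : List Int) (covered : PySem.Set Int)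
    (remaining : List Int) : Option Int × Option Int :=
  remaining.foldl (pvStepA adj T covered) (none, none)

-- A's main loop; fuel = min(target_size, len(remaining)) iterations, early break on best_k = None.
-- remaining.remove(best): best is always a member (it came from the scan), so Python never raises.
def pvLoopA (adj : List (Int × List Int)) :
    Nat → List Int → PySem.Set Int → List Int → List Int
  | 0, T, _, _ => T
  | fuel+1, T, covered, remaining =>
    match (pvScanA adj T covered remaining).1 with
    | none => T
    | some best =>
      pvLoopA adj fuel (T ++ [best])
        ((pvAdj adj best).foldl (fun c m => PySem.Set.add c m) covered)
        ((PySem.List.remove? remaining best).getD remaining)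

def greedy_adversarial_fast (elements : List Int) (adj : List (Int × List Int)) (target_size : Int) : List Int :=
  if elements = [] ∨ target_size ≤ 0 then []
  else
    let remaining := PySem.List.sorted elements (fun k => pvKey adj k)
    pvLoopA adj (min target_size (remaining.length : Int)).toNat [] PySem.Set.empty remaining

-- ===== PORT B =====
-- B's main loop: pick min(order, key=cnt[.]), then cover best's vertices, decrementing the
-- maintained counts through the reverse index rev.  order.remove(best)/min(order): best/the
-- minimum always exist (fuel ≤ len(order)), so Python never raises.
-- one covered-vertex step of B: skip if already covered, else cover m and decrement through rev
def pvStepB (rev : PySem.Dict Int (List Int)) (st : PySem.Set Int × PySem.Dict Int Int)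
    (m : Int) : PySem.Set Int × PySem.Dict Int Int :=
  if PySem.Set.contains st.1 m then st
  else (PySem.Set.add st.1 m,
        (PySem.Dict.getD rev m []).foldl
          (fun c k => PySem.Dict.modify c k 0 (fun v => v - 1)) st.2)

def pvLoopB (adj : List (Int × List Int)) (rev : PySem.Dict Int (List Int)) :
    Nat → List Int → List Int → PySem.Dict Int Int → PySem.Set Int → List Int
  | 0, res, _, _, _ => res
  | fuel+1, res, order, cnt, covered =>
    match PySem.List.min? order (fun k => PySem.Dict.getD cnt k 0) with
    | none => res
    | some best =>
      let st := (pvAdj adj best).foldl (pvStepB rev) (covered, cnt)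
      pvLoopB adj rev fuel (res ++ [best]) ((PySem.List.remove? order best).getD order) st.2 st.1

def greedy_adversarial_fast_alt (elements : List Int) (adj : List (Int × List Int)) (target_size : Int) : List Int :=
  if elements = [] ∨ target_size ≤ 0 then []
  else
    -- list(dict.fromkeys(sorted(elements, key=...)))
    let order := PySem.List.dedup (PySem.List.sorted elements (fun k => pvKey adj k))
    -- {k: len(adj.get(k, [])) for k in order}
    let cnt := order.foldl (fun d k => PySem.Dict.insert d k (pvKey adj k)) PySem.Dict.empty
    -- rev.setdefault(m, []).append(k)
    let rev := order.foldl (fun r k =>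
        (pvAdj adj k).foldl (fun r m => PySem.Dict.modify r m [] (fun l => l ++ [k])) r)
      PySem.Dict.empty
    pvLoopB adj rev (min target_size (order.length : Int)).toNat [] order cnt PySem.Set.empty

-- ===== PRECONDITION & SPEC =====
def Spec_greedy_adversarial_fast (elements : List Int) (adj : List (Int × List Int)) (target_size : Int) (out : List Int) : Prop := out = greedy_adversarial_fast_alt elements adj target_size
instance (elements : List Int) (adj : List (Int × List Int)) (target_size : Int) (out : List Int) : Decidable (Spec_greedy_adversarial_fast elements adj target_size out) := by unfold Spec_greedy_adversarial_fast; infer_instance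

-- ===== CLAIM (what is proved, stated in full; the proofs are below) =====
def Claim_equal_greedy_adversarial_fast : Prop := ∀ (elements : List Int) (adj : List (Int × List Int)) (target_size : Int), Dom_greedy_adversarial_fast elements adj target_size → Spec_greedy_adversarial_fast elements adj target_size (greedy_adversarial_fast elements adj target_size)

-- ===== LEMMAS AND PROOFS =====

-- first-minimum machinery: min? and A's scan are both left folds keeping the first key-minimum
def pvComb (key : Int → Int) (a b : Int) : Int := if key a ≤ key b then a else b

def pvCombO (key : Int → Int) (a : Int) : Option Int → Int
  | none => a
  | some b => pvComb key a b

def pvFM (key : Int → Int) : List Int → Option Int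
  | [] => none
  | x :: xs => some (pvCombO key x (pvFM key xs))

def pvMinQ (key : Int → Int) : Option Int → Int → Option Int :=
  fun acc x => match acc with
    | none => some x
    | some m => if key x < key m then some x else some m

theorem pvComb_assoc (key : Int → Int) (a b c : Int) :
    pvComb key (pvComb key a b) c = pvComb key a (pvComb key b c) := by
  unfold pvComb; split_ifs <;> first | rfl | omega

theorem pvCombO_rot (key : Int → Int) (w y : Int) (r : Option Int) :
    pvCombO key w (some (pvCombO key y r)) = pvCombO key (pvComb key w y) r := by
  cases r with
  | none => rfl
  | some z => exact (pvComb_assoc key w y z).symm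

theorem pvFoldl_minq_some (key : Int → Int) :
    ∀ (xs : List Int) (m : Int),
      xs.foldl (pvMinQ key) (some m) = some (pvCombO key m (pvFM key xs))
  | [], m => rfl
  | x :: xs, m => by
    have h1 : pvMinQ key (some m) x = some (pvComb key m x) := by
      show (if key x < key m then some x else some m) = some (if key m ≤ key x then m else x)
      by_cases h : key x < key m
      · rw [if_pos h, if_neg (by omega)]
      · rw [if_neg h, if_pos (by omega)]
    rw [List.foldl_cons, h1, pvFoldl_minq_some key xs (pvComb key m x)]
    show _ = some (pvCombO key m (pvFM key (x :: xs)))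
    rw [show pvFM key (x :: xs) = some (pvCombO key x (pvFM key xs)) from rfl,
        pvCombO_rot]

theorem pvMin?_eq_foldl (key : Int → Int) (xs : List Int) :
    PySem.List.min? xs key = xs.foldl (pvMinQ key) none := by
  unfold PySem.List.min?
  congr 1
  funext acc x
  cases acc <;> rfl

theorem pvMin?_eq_pvFM (key : Int → Int) (xs : List Int) :
    PySem.List.min? xs key = pvFM key xs := by
  rw [pvMin?_eq_foldl]
  cases xs with
  | nil => rfl
  | cons x t =>
    rw [List.foldl_cons, show pvMinQ key none x = some x from rfl, pvFoldl_minq_some]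
    rfl

theorem pvFM_mem (key : Int → Int) :
    ∀ (xs : List Int) (y : Int), pvFM key xs = some y → y ∈ xs
  | x :: xs, y, h => by
    rw [show pvFM key (x :: xs) = some (pvCombO key x (pvFM key xs)) from rfl] at h
    cases hr : pvFM key xs with
    | none => rw [hr] at h; simp [pvCombO] at h; simp [h]
    | some b =>
      rw [hr] at h
      simp only [pvCombO, pvComb, Option.some.injEq] at h
      have hb := pvFM_mem key xs b hr
      split at h <;> simp [← h, hb]

theorem pvFM_congr (key1 key2 : Int → Int) :
    ∀ (xs : List Int), (∀ x ∈ xs, key1 x = key2 x) → pvFM key1 xs = pvFM key2 xs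
  | [], _ => rfl
  | x :: xs, h => by
    have ih := pvFM_congr key1 key2 xs (fun y hy => h y (List.mem_cons_of_mem _ hy))
    show some (pvCombO key1 x (pvFM key1 xs)) = some (pvCombO key2 x (pvFM key2 xs))
    rw [ih]
    cases hr : pvFM key2 xs with
    | none => rfl
    | some y =>
      have hy := h y (List.mem_cons_of_mem _ (pvFM_mem key2 xs y hr))
      have hx := h x (List.mem_cons_self ..)
      simp only [pvCombO, pvComb, hx, hy]

theorem pvComb_key_le (key : Int → Int) (a b : Int) :
    key (pvComb key a b) ≤ key a := by
  unfold pvComb; split_ifs <;> omega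

-- dropping later duplicates of x never changes a first-minimum headed by some w with key w ≤ key x
theorem pvCombO_filter (key : Int → Int) :
    ∀ (l : List Int) (w x : Int), key w ≤ key x →
      pvCombO key w (pvFM key (l.filter (fun y => !(y == x)))) = pvCombO key w (pvFM key l)
  | [], w, x, h => rfl
  | y :: t, w, x, h => by
    by_cases hyx : y = x
    · subst hyx
      rw [show (y :: t).filter (fun z => !(z == y)) = t.filter (fun z => !(z == y)) by simp]
      rw [pvCombO_filter key t w y h]
      rw [show pvFM key (y :: t) = some (pvCombO key y (pvFM key t)) from rfl, pvCombO_rot]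
      rw [show pvComb key w y = w by unfold pvComb; split_ifs <;> omega]
    · rw [show (y :: t).filter (fun z => !(z == x)) = y :: t.filter (fun z => !(z == x)) by
          simp [hyx]]
      rw [show pvFM key (y :: t.filter (fun z => !(z == x)))
            = some (pvCombO key y (pvFM key (t.filter (fun z => !(z == x))))) from rfl]
      rw [show pvFM key (y :: t) = some (pvCombO key y (pvFM key t)) from rfl]
      rw [pvCombO_rot, pvCombO_rot]
      exact pvCombO_filter key t (pvComb key w y) x
        (le_trans (pvComb_key_le key w y) h)

theorem pvFM_dedup (key : Int → Int) :
    ∀ (xs : List Int), pvFM key (PySem.List.dedup xs) = pvFM key xs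
  | [] => rfl
  | x :: xs => by
    rw [show PySem.List.dedup (x :: xs) = PySem.Set.ofList (x :: xs) from rfl,
        PySem.Set.ofList_cons]
    show some (pvCombO key x (pvFM key (PySem.Set.discard (PySem.Set.ofList xs) x)))
       = some (pvCombO key x (pvFM key xs))
    rw [show PySem.Set.discard (PySem.Set.ofList xs) x
          = (PySem.Set.ofList xs).filter (fun y => !(y == x)) from rfl]
    rw [pvCombO_filter key (PySem.Set.ofList xs) x x le_rfl]
    rw [show (PySem.Set.ofList xs : List Int) = PySem.List.dedup xs from rfl, pvFM_dedup key xs]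

-- set helpers
theorem pvContains_eq_decide (s : PySem.Set Int) (x : Int) :
    PySem.Set.contains s x = decide (x ∈ s) := by
  by_cases h : x ∈ s
  · simp [h]
  · simp only [h, decide_false]
    by_contra hc
    exact h ((PySem.Set.contains_iff s x).mp (by revert hc; cases PySem.Set.contains s x <;> simp))

theorem pvContains_ofList (T : List Int) (x : Int) :
    PySem.Set.contains (PySem.Set.ofList T) x = decide (x ∈ T) := by
  rw [pvContains_eq_decide]
  by_cases h : x ∈ T <;> simp [h, PySem.Set.mem_ofList]

theorem pvContains_add (s : PySem.Set Int) (m x : Int) :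
    PySem.Set.contains (PySem.Set.add s m) x = (PySem.Set.contains s x || x == m) := by
  rw [pvContains_eq_decide, pvContains_eq_decide]
  by_cases h : x ∈ s <;> by_cases hxm : x = m <;>
    simp [h, hxm, PySem.Set.mem_add]

theorem pvNew_congr (adj : List (Int × List Int)) (s t : PySem.Set Int)
    (h : ∀ x, PySem.Set.contains s x = PySem.Set.contains t x) (k : Int) :
    pvNew adj s k = pvNew adj t k := by
  unfold pvNew
  congr 1
  exact List.countP_congr (fun a _ => by rw [h a])

theorem pvCountP_split (p : Int → Bool) (m : Int) (hm : p m = true) :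
    ∀ l : List Int, l.countP p = l.countP (fun x => p x && !(x == m)) + l.count m
  | [] => rfl
  | y :: l => by
    have ih := pvCountP_split p m hm l
    by_cases hy : y = m
    · subst hy
      simp [List.countP_cons, hm, ih]; omega
    · simp only [List.countP_cons, List.count_cons, beq_iff_eq, hy, ih]
      by_cases hp : p y <;> simp [hp, hy] <;> omega

theorem pvNew_add (adj : List (Int × List Int)) (s : PySem.Set Int) (m k : Int)
    (h : PySem.Set.contains s m = false) :
    pvNew adj (PySem.Set.add s m) k = pvNew adj s k - ((pvAdj adj k).count m : Int) := by
  unfold pvNew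
  have hcongr : (pvAdj adj k).countP (fun x => !(PySem.Set.contains (PySem.Set.add s m) x))
      = (pvAdj adj k).countP (fun x => !(PySem.Set.contains s x) && !(x == m)) :=
    List.countP_congr (fun a _ => by rw [pvContains_add]; cases PySem.Set.contains s a <;>
      cases hb : (a == m) <;> simp)
  have hsplit := pvCountP_split (fun x => !(PySem.Set.contains s x)) m
    (by show (!PySem.Set.contains s m) = true; rw [h]; rfl) (pvAdj adj k)
  rw [hcongr]
  omega

theorem pvCov_congr :
    ∀ (xs : List Int) (s t : PySem.Set Int),
      (∀ x, PySem.Set.contains s x = PySem.Set.contains t x) →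
      ∀ x, PySem.Set.contains (xs.foldl (fun c m => PySem.Set.add c m) s) x
         = PySem.Set.contains (xs.foldl (fun c m => PySem.Set.add c m) t) x
  | [], s, t, h => h
  | m :: xs, s, t, h => by
    intro x
    exact pvCov_congr xs (PySem.Set.add s m) (PySem.Set.add t m)
      (fun y => by rw [pvContains_add, pvContains_add, h y]) x

-- dict helpers
theorem pvDec_getD :
    ∀ (l : List Int) (d : PySem.Dict Int Int) (v : Int),
      PySem.Dict.getD (l.foldl (fun c k => PySem.Dict.modify c k 0 (fun x => x - 1)) d) v 0
        = PySem.Dict.getD d v 0 - (l.count v : Int)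
  | [], d, v => by simp
  | k :: l, d, v => by
    rw [List.foldl_cons, pvDec_getD l _ v, List.count_cons]
    simp only [PySem.Dict.modify]
    rw [PySem.Dict.getD_insert]
    by_cases hv : v = k
    · subst hv; simp; omega
    · have hkv : ¬ (k = v) := fun h => hv h.symm
      simp [hv, hkv]

theorem pvInit_getD_notmem (g : Int → Int) :
    ∀ (l : List Int) (d : PySem.Dict Int Int) (k : Int), k ∉ l →
      PySem.Dict.getD (l.foldl (fun d k => PySem.Dict.insert d k (g k)) d) k 0
        = PySem.Dict.getD d k 0
  | [], d, k, _ => rfl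
  | a :: l, d, k, h => by
    have hka : k ≠ a := fun he => h (he ▸ List.mem_cons_self ..)
    rw [List.foldl_cons, pvInit_getD_notmem g l _ k (fun hm => h (List.mem_cons_of_mem _ hm)),
        PySem.Dict.getD_insert, if_neg hka]

theorem pvInit_getD (g : Int → Int) :
    ∀ (l : List Int) (d : PySem.Dict Int Int) (k : Int), l.Nodup → k ∈ l →
      PySem.Dict.getD (l.foldl (fun d k => PySem.Dict.insert d k (g k)) d) k 0 = g k
  | a :: l, d, k, hnd, hk => by
    rw [List.foldl_cons]
    rcases List.mem_cons.mp hk with he | hm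
    · subst he
      rw [pvInit_getD_notmem g l _ k (List.nodup_cons.mp hnd).1,
          PySem.Dict.getD_insert_self]
    · exact pvInit_getD g l _ k (List.nodup_cons.mp hnd).2 hm

-- reverse-index lemmas
theorem pvRev_flat (adj : List (Int × List Int)) :
    ∀ (l : List Int) (r0 : PySem.Dict Int (List Int)),
      l.foldl (fun r k =>
          (pvAdj adj k).foldl (fun r m => PySem.Dict.modify r m [] (fun t => t ++ [k])) r) r0
        = (l.flatMap (fun k => (pvAdj adj k).map (fun m => (m, k)))).foldl
            (fun r p => PySem.Dict.modify r p.1 [] (fun t => t ++ [p.2])) r0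
  | [], r0 => rfl
  | a :: l, r0 => by
    rw [List.foldl_cons, List.flatMap_cons, List.foldl_append, List.foldl_map,
        pvRev_flat adj l]

theorem pvConstMap_count (a k : Int) :
    ∀ (l : List Int), (l.map (fun _ => a)).count k = if a = k then l.length else 0
  | [] => by simp
  | x :: l => by
    rw [List.map_cons, List.count_cons, pvConstMap_count a k l]
    by_cases h : a = k <;> simp [h]

theorem pvPairs_count_zero (adj : List (Int × List Int)) (m k : Int) :
    ∀ (l : List Int), k ∉ l →
      (((l.flatMap (fun k' => (pvAdj adj k').map (fun m' => (m', k')))).filter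
          (fun p => p.1 == m)).map (fun p => p.2)).count k = 0 := by
  intro l hk
  rw [List.count_eq_zero]
  intro hmem
  obtain ⟨p, hp, hp2⟩ := List.mem_map.mp hmem
  obtain ⟨hpf, _⟩ := List.mem_filter.mp hp
  obtain ⟨a, ha, hpa⟩ := List.mem_flatMap.mp hpf
  obtain ⟨m', _, he⟩ := List.mem_map.mp hpa
  apply hk
  rw [← hp2, ← he]
  simpa using ha

theorem pvPairs_count (adj : List (Int × List Int)) (m k : Int) :
    ∀ (l : List Int), l.Nodup → k ∈ l →
      (((l.flatMap (fun k' => (pvAdj adj k').map (fun m' => (m', k')))).filter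
          (fun p => p.1 == m)).map (fun p => p.2)).count k = (pvAdj adj k).count m
  | a :: l, hnd, hk => by
    rw [List.flatMap_cons, List.filter_append, List.map_append, List.count_append]
    have hhead : ((((pvAdj adj a).map (fun m' => (m', a))).filter (fun p => p.1 == m)).map
        (fun p => p.2)).count k = if a = k then (pvAdj adj a).count m else 0 := by
      rw [List.filter_map, List.map_map]
      have hmc : ((pvAdj adj a).filter (fun m' => m' == m)).map
            ((fun p : Int × Int => p.2) ∘ (fun m' => (m', a)))
          = ((pvAdj adj a).filter (fun m' => m' == m)).map (fun _ => a) :=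
        List.map_congr_left (fun a' _ => rfl)
      rw [show ((fun p : Int × Int => p.1 == m) ∘ (fun m' => (m', a))) = (fun m' => m' == m) from rfl] at *
      rw [hmc, pvConstMap_count]
      have hlen : ((pvAdj adj a).filter (fun m' => m' == m)).length = (pvAdj adj a).count m := by
        rw [← List.countP_eq_length_filter]
        rfl
      by_cases h : a = k
      · rw [if_pos h, if_pos h, hlen]
      · rw [if_neg h, if_neg h]
    rcases List.mem_cons.mp hk with he | hm
    · rw [hhead, if_pos he.symm,
          pvPairs_count_zero adj m k l (fun hkl => (List.nodup_cons.mp hnd).1 (he ▸ hkl)),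
          he]
      omega
    · have hak : ¬ (a = k) := fun he => (List.nodup_cons.mp hnd).1 (he ▸ hm)
      rw [hhead, if_neg hak, pvPairs_count adj m k l (List.nodup_cons.mp hnd).2 hm]
      omega

theorem pvRev_count (adj : List (Int × List Int)) :
    ∀ (l : List Int), l.Nodup → ∀ (k m : Int), k ∈ l →
      ((PySem.Dict.getD
          (l.foldl (fun r k =>
            (pvAdj adj k).foldl (fun r m => PySem.Dict.modify r m [] (fun t => t ++ [k])) r)
            PySem.Dict.empty) m []).count k : Int)
        = ((pvAdj adj k).count m : Int) := by
  intro l hnd k m hk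
  rw [pvRev_flat, PySem.Dict.getD_foldl_modify_append]
  rw [show PySem.Dict.getD (PySem.Dict.empty : PySem.Dict Int (List Int)) m [] = [] from rfl]
  rw [List.nil_append]
  exact_mod_cast congrArg Nat.cast (pvPairs_count adj m k l hnd hk)

-- B's covering fold: covered becomes plain foldl add, and the maintained counts stay exact
theorem pvUpdB (adj : List (Int × List Int)) (rev : PySem.Dict Int (List Int)) (order₀ : List Int)
    (hrev : ∀ k m, k ∈ order₀ →
      ((PySem.Dict.getD rev m []).count k : Int) = ((pvAdj adj k).count m : Int)) :
    ∀ (xs : List Int) (covB : PySem.Set Int) (cnt : PySem.Dict Int Int),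
      (∀ k ∈ order₀, PySem.Dict.getD cnt k 0 = pvNew adj covB k) →
      (xs.foldl (pvStepB rev) (covB, cnt)).1 = xs.foldl (fun c m => PySem.Set.add c m) covB
      ∧ ∀ k ∈ order₀,
          PySem.Dict.getD ((xs.foldl (pvStepB rev) (covB, cnt)).2) k 0
            = pvNew adj (xs.foldl (fun c m => PySem.Set.add c m) covB) k
  | [], covB, cnt, h => ⟨rfl, h⟩
  | m :: xs, covB, cnt, h => by
    rw [List.foldl_cons, List.foldl_cons]
    by_cases hc : PySem.Set.contains covB m
    · have hmem : m ∈ covB := (PySem.Set.contains_iff covB m).mp hc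
      rw [show pvStepB rev (covB, cnt) m = (covB, cnt) by unfold pvStepB; rw [if_pos hc],
          PySem.Set.add_of_mem hmem]
      exact pvUpdB adj rev order₀ hrev xs covB cnt h
    · have hcf : PySem.Set.contains covB m = false := by
        cases hb : PySem.Set.contains covB m
        · rfl
        · exact absurd hb hc
      rw [show pvStepB rev (covB, cnt) m
            = (PySem.Set.add covB m,
               (PySem.Dict.getD rev m []).foldl
                 (fun c k => PySem.Dict.modify c k 0 (fun v => v - 1)) cnt) by
          unfold pvStepB; rw [if_neg hc]]
      refine pvUpdB adj rev order₀ hrev xs (PySem.Set.add covB m) _ ?_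
      intro k hk
      rw [pvDec_getD, h k hk, hrev k m hk, pvNew_add adj covB m k hcf]

-- dedup commutes with filter; erasing a filtered-out element is invisible
theorem pvFilter_swap (p q : Int → Bool) (l : List Int) :
    (l.filter p).filter q = (l.filter q).filter p := by
  rw [List.filter_filter, List.filter_filter]
  exact List.filter_congr (fun a _ => Bool.and_comm _ _)

theorem pvDedup_filter (p : Int → Bool) :
    ∀ (l : List Int), PySem.List.dedup (l.filter p) = (PySem.List.dedup l).filter p
  | [] => rfl
  | x :: l => by
    by_cases px : p x
    · rw [show (x :: l).filter p = x :: l.filter p by simp [px]]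
      rw [show PySem.List.dedup (x :: l.filter p) = PySem.Set.ofList (x :: l.filter p) from rfl,
          PySem.Set.ofList_cons,
          show PySem.List.dedup (x :: l) = PySem.Set.ofList (x :: l) from rfl,
          PySem.Set.ofList_cons]
      rw [show (x :: PySem.Set.discard (PySem.Set.ofList l) x).filter p
            = x :: (PySem.Set.discard (PySem.Set.ofList l) x).filter p by simp [px]]
      congr 1
      show PySem.Set.discard (PySem.Set.ofList (l.filter p)) x = _
      rw [show ∀ s : PySem.Set Int, PySem.Set.discard s x = s.filter (fun y => !(y == x))
            from fun s => rfl]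
      rw [show (PySem.Set.ofList (l.filter p) : List Int) = PySem.List.dedup (l.filter p) from rfl,
          pvDedup_filter p l]
      exact pvFilter_swap _ _ _
    · rw [show (x :: l).filter p = l.filter p by simp [px]]
      rw [pvDedup_filter p l]
      rw [show PySem.List.dedup (x :: l) = PySem.Set.ofList (x :: l) from rfl,
          PySem.Set.ofList_cons]
      rw [show (x :: PySem.Set.discard (PySem.Set.ofList l) x).filter p
            = (PySem.Set.discard (PySem.Set.ofList l) x).filter p by simp [px]]
      rw [show ∀ s : PySem.Set Int, PySem.Set.discard s x = s.filter (fun y => !(y == x))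
            from fun s => rfl]
      rw [List.filter_filter]
      refine (List.filter_congr (fun a _ => ?_)).symm
      by_cases hax : a = x
      · subst hax; simp [px]
      · simp [hax]
  termination_by l => l.length

theorem pvErase_filter (p : Int → Bool) (b : Int) (hb : p b = false) :
    ∀ (l : List Int), (l.erase b).filter p = l.filter p
  | [] => rfl
  | y :: t => by
    by_cases hyb : y = b
    · subst hyb
      rw [List.erase_cons_head, show (y :: t).filter p = t.filter p by simp [hb]]
    · rw [List.erase_cons_tail (by simp [hyb])]
      by_cases hp : p y <;> simp [hp, pvErase_filter p b hb t]

theorem pvErase_nodup (b : Int) :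
    ∀ (l : List Int), l.Nodup → l.erase b = l.filter (fun y => !(y == b))
  | [], _ => rfl
  | y :: t, hnd => by
    by_cases hyb : y = b
    · subst hyb
      rw [List.erase_cons_head,
          show (y :: t).filter (fun z => !(z == y)) = t.filter (fun z => !(z == y)) by simp]
      exact (List.filter_eq_self.mpr (fun a ha => by
        simp; exact fun he => (List.nodup_cons.mp hnd).1 (he ▸ ha))).symm
    · rw [List.erase_cons_tail (by simp [hyb]),
          show (y :: t).filter (fun z => !(z == b)) = y :: t.filter (fun z => !(z == b)) by
            simp [hyb]]
      rw [pvErase_nodup b t (List.nodup_cons.mp hnd).2]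

-- A's scan is min? of the filtered list
theorem pvScanA_fold (adj : List (Int × List Int)) (T : List Int) (covered : PySem.Set Int) :
    ∀ (l : List Int) (o : Option Int),
      l.foldl (pvStepA adj T covered) (o, Option.map (pvNew adj covered) o)
      = ((l.filter (fun k => !(decide (k ∈ T)))).foldl (pvMinQ (pvNew adj covered)) o,
         Option.map (pvNew adj covered)
           ((l.filter (fun k => !(decide (k ∈ T)))).foldl (pvMinQ (pvNew adj covered)) o))
  | [], o => rfl
  | k :: l, o => by
    by_cases hc : k ∈ T
    · have hcc : PySem.Set.contains (PySem.Set.ofList T) k = true := by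
        rw [pvContains_ofList]; exact decide_eq_true hc
      rw [List.foldl_cons,
          show pvStepA adj T covered (o, Option.map (pvNew adj covered) o) k
            = (o, Option.map (pvNew adj covered) o) by unfold pvStepA; rw [if_pos hcc],
          show (k :: l).filter (fun k => !(decide (k ∈ T)))
            = l.filter (fun k => !(decide (k ∈ T))) by
            rw [List.filter_cons]; simp [hc]]
      exact pvScanA_fold adj T covered l o
    · have hcc : PySem.Set.contains (PySem.Set.ofList T) k = false := by
        rw [pvContains_ofList]; exact decide_eq_false hc
      rw [List.foldl_cons,
          show (k :: l).filter (fun k => !(decide (k ∈ T)))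
            = k :: l.filter (fun k => !(decide (k ∈ T))) by
            rw [List.filter_cons]; simp [hc],
          List.foldl_cons]
      have hstep : pvStepA adj T covered (o, Option.map (pvNew adj covered) o) k
          = (pvMinQ (pvNew adj covered) o k,
             Option.map (pvNew adj covered) (pvMinQ (pvNew adj covered) o k)) := by
        cases o with
        | none => unfold pvStepA; rw [if_neg (by rw [hcc]; simp)]; rfl
        | some m =>
          unfold pvStepA
          rw [if_neg (by rw [hcc]; simp)]
          show (if pvNew adj covered k < pvNew adj covered m
                  then (some k, some (pvNew adj covered k))
                  else (some m, some (pvNew adj covered m))) = _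
          by_cases hlt : pvNew adj covered k < pvNew adj covered m
          · rw [if_pos hlt, show pvMinQ (pvNew adj covered) (some m) k = some k by
              show (if pvNew adj covered k < pvNew adj covered m then some k else some m) = some k
              rw [if_pos hlt]]
            rfl
          · rw [if_neg hlt, show pvMinQ (pvNew adj covered) (some m) k = some m by
              show (if pvNew adj covered k < pvNew adj covered m then some k else some m) = some m
              rw [if_neg hlt]]
            rfl
      rw [hstep]
      exact pvScanA_fold adj T covered l (pvMinQ (pvNew adj covered) o k)

theorem pvScanA_eq (adj : List (Int × List Int)) (T : List Int) (covered : PySem.Set Int)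
    (remaining : List Int) :
    (pvScanA adj T covered remaining).1 =
      PySem.List.min? (remaining.filter (fun k => !(decide (k ∈ T)))) (pvNew adj covered) := by
  unfold pvScanA
  rw [show ((none, none) : Option Int × Option Int)
        = ((none : Option Int), Option.map (pvNew adj covered) none) from rfl,
      pvScanA_fold, pvMin?_eq_foldl]

-- the coupled main induction
theorem pvMain (adj : List (Int × List Int)) (order₀ : List Int) (rev : PySem.Dict Int (List Int))
    (hnd : order₀.Nodup)
    (hrev : ∀ k m, k ∈ order₀ →
      ((PySem.Dict.getD rev m []).count k : Int) = ((pvAdj adj k).count m : Int)) :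
    ∀ (fuelA : Nat) (T : List Int) (covA covB : PySem.Set Int) (remaining order : List Int)
      (cnt : PySem.Dict Int Int),
      (∀ x, PySem.Set.contains covA x = PySem.Set.contains covB x) →
      order = order₀.filter (fun k => !(decide (k ∈ T))) →
      PySem.List.dedup (remaining.filter (fun k => !(decide (k ∈ T)))) = order →
      (∀ k ∈ order₀, PySem.Dict.getD cnt k 0 = pvNew adj covB k) →
      pvLoopA adj fuelA T covA remaining
        = pvLoopB adj rev (min fuelA order.length) T order cnt covB
  | 0, T, covA, covB, remaining, order, cnt, h1, h2, h5, h3 => by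
    rw [show min 0 order.length = 0 from Nat.zero_min _]
    rfl
  | fuelA+1, T, covA, covB, remaining, order, cnt, h1, h2, h5, h3 => by
    have hsub : ∀ k ∈ order, k ∈ order₀ := by
      intro k hk; rw [h2] at hk; exact (List.mem_filter.mp hk).1
    have hkey : ∀ k ∈ order, PySem.Dict.getD cnt k 0 = pvNew adj covA k := fun k hk =>
      (h3 k (hsub k hk)).trans (pvNew_congr adj covB covA (fun x => (h1 x).symm) k)
    have hscan : (pvScanA adj T covA remaining).1
        = PySem.List.min? order (fun k => PySem.Dict.getD cnt k 0) := by
      rw [pvScanA_eq, pvMin?_eq_pvFM, ← pvFM_dedup, h5, pvMin?_eq_pvFM]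
      exact pvFM_congr _ _ order (fun k hk => (hkey k hk).symm)
    show (match (pvScanA adj T covA remaining).1 with
          | none => T
          | some best =>
            pvLoopA adj fuelA (T ++ [best])
              ((pvAdj adj best).foldl (fun c m => PySem.Set.add c m) covA)
              ((PySem.List.remove? remaining best).getD remaining)) = _
    cases horder : order with
    | nil =>
      have hnone : (pvScanA adj T covA remaining).1 = none := by
        rw [hscan, horder]; rfl
      rw [hnone]
      rw [show min (fuelA+1) ([] : List Int).length = 0 by simp]
      rfl
    | cons o os =>
      have hne : order ≠ [] := by rw [horder]; simp
      obtain ⟨best, hbest⟩ : ∃ b, PySem.List.min? order (fun k => PySem.Dict.getD cnt k 0) = some b := by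
        cases hmq : PySem.List.min? order (fun k => PySem.Dict.getD cnt k 0) with
        | none => exact absurd ((PySem.List.min?_eq_none_iff _ _).mp hmq) hne
        | some b => exact ⟨b, rfl⟩
      have hbo : best ∈ order := PySem.List.min?_mem hbest
      have hbo₀ : best ∈ order₀ := hsub best hbo
      have hbT : best ∉ T := by
        rw [h2] at hbo
        simpa using (List.mem_filter.mp hbo).2
      have hbr : best ∈ remaining := by
        have hd : best ∈ PySem.List.dedup (remaining.filter (fun k => !(decide (k ∈ T)))) := by
          rw [h5]; exact hbo
        exact (List.mem_filter.mp ((PySem.List.mem_dedup _ _).mp hd)).1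
      rw [← horder]
      rw [hscan, hbest]
      -- both sides take one step
      have hond : order.Nodup := by rw [h2]; exact hnd.filter _
      have hfun : (fun k => !(decide (k ∈ T ++ [best])))
          = (fun k => (!(decide (k ∈ T))) && (!(k == best))) := by
        funext k
        by_cases h1k : k ∈ T <;> by_cases h2k : k = best <;> simp [h1k, h2k]
      have h2' : order.erase best = order₀.filter (fun k => !(decide (k ∈ T ++ [best]))) := by
        rw [pvErase_nodup best order hond, h2, List.filter_filter, hfun]
        exact List.filter_congr (fun a _ => Bool.and_comm _ _)
      have hsplit : remaining.filter (fun k => (!(decide (k ∈ T))) && (!(k == best)))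
          = (remaining.filter (fun k => !(decide (k ∈ T)))).filter (fun k => !(k == best)) := by
        rw [List.filter_filter]
        exact List.filter_congr (fun a _ => Bool.and_comm _ _)
      have h5' : PySem.List.dedup
            ((remaining.erase best).filter (fun k => !(decide (k ∈ T ++ [best]))))
          = order.erase best := by
        rw [hfun,
            pvErase_filter _ best (by simp) remaining,
            hsplit, pvDedup_filter, h5, ← pvErase_nodup best order hond]
      obtain ⟨hcov, hcnt⟩ := pvUpdB adj rev order₀ hrev (pvAdj adj best) covB cnt h3
      have h1' : ∀ x,
          PySem.Set.contains ((pvAdj adj best).foldl (fun c m => PySem.Set.add c m) covA) x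
            = PySem.Set.contains (((pvAdj adj best).foldl (pvStepB rev) (covB, cnt)).1) x := by
        intro x; rw [hcov]; exact pvCov_congr _ covA covB h1 x
      have h3' : ∀ k ∈ order₀,
          PySem.Dict.getD (((pvAdj adj best).foldl (pvStepB rev) (covB, cnt)).2) k 0
            = pvNew adj (((pvAdj adj best).foldl (pvStepB rev) (covB, cnt)).1) k := by
        intro k hk; rw [hcov]; exact hcnt k hk
      have ih := pvMain adj order₀ rev hnd hrev fuelA (T ++ [best])
        ((pvAdj adj best).foldl (fun c m => PySem.Set.add c m) covA)
        (((pvAdj adj best).foldl (pvStepB rev) (covB, cnt)).1)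
        (remaining.erase best) (order.erase best)
        (((pvAdj adj best).foldl (pvStepB rev) (covB, cnt)).2)
        h1' h2' h5' h3'
      have hlen1 : min (fuelA+1) order.length = (min fuelA (order.erase best).length) + 1 := by
        rw [List.length_erase_of_mem hbo, horder]
        simp only [List.length_cons]
        omega
      rw [hlen1]
      show pvLoopA adj fuelA (T ++ [best])
            ((pvAdj adj best).foldl (fun c m => PySem.Set.add c m) covA)
            ((PySem.List.remove? remaining best).getD remaining)
          = pvLoopB adj rev (min fuelA (order.erase best).length + 1) T order cnt covB
      rw [PySem.List.remove?_eq_some_erase remaining best hbr, Option.getD_some]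
      rw [show pvLoopB adj rev (min fuelA (order.erase best).length + 1) T order cnt covB
            = (match PySem.List.min? order (fun k => PySem.Dict.getD cnt k 0) with
               | none => T
               | some b =>
                 pvLoopB adj rev (min fuelA (order.erase best).length) (T ++ [b])
                   ((PySem.List.remove? order b).getD order)
                   (((pvAdj adj b).foldl (pvStepB rev) (covB, cnt)).2)
                   (((pvAdj adj b).foldl (pvStepB rev) (covB, cnt)).1)) from rfl]
      rw [hbest]
      show pvLoopA adj fuelA (T ++ [best])
            ((pvAdj adj best).foldl (fun c m => PySem.Set.add c m) covA)
            (remaining.erase best)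
          = pvLoopB adj rev (min fuelA (order.erase best).length) (T ++ [best])
              ((PySem.List.remove? order best).getD order)
              (((pvAdj adj best).foldl (pvStepB rev) (covB, cnt)).2)
              (((pvAdj adj best).foldl (pvStepB rev) (covB, cnt)).1)
      rw [show (PySem.List.remove? order best).getD order = order.erase best by
        rw [PySem.List.remove?_eq_some_erase order best hbo, Option.getD_some]]
      exact ih

-- ===== VERDICT (by name: the statement is the Claim_ definition above) =====
theorem greedy_adversarial_fast_spec : Claim_equal_greedy_adversarial_fast := by
  unfold Claim_equal_greedy_adversarial_fast
  intro elements adj target_size _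
  unfold Spec_greedy_adversarial_fast greedy_adversarial_fast greedy_adversarial_fast_alt
  by_cases h : elements = [] ∨ target_size ≤ 0
  · rw [if_pos h, if_pos h]
  · rw [if_neg h, if_neg h]
    show pvLoopA adj
        (min target_size (((PySem.List.sorted elements (fun k => pvKey adj k)).length : Int))).toNat
        [] PySem.Set.empty (PySem.List.sorted elements (fun k => pvKey adj k))
      = pvLoopB adj
        ((PySem.List.dedup (PySem.List.sorted elements (fun k => pvKey adj k))).foldl
          (fun r k =>
            (pvAdj adj k).foldl (fun r m => PySem.Dict.modify r m [] (fun l => l ++ [k])) r)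
          PySem.Dict.empty)
        (min target_size
          (((PySem.List.dedup (PySem.List.sorted elements (fun k => pvKey adj k))).length : Int))).toNat
        []
        (PySem.List.dedup (PySem.List.sorted elements (fun k => pvKey adj k)))
        ((PySem.List.dedup (PySem.List.sorted elements (fun k => pvKey adj k))).foldl
          (fun d k => PySem.Dict.insert d k (pvKey adj k)) PySem.Dict.empty)
        PySem.Set.empty
    set rem := PySem.List.sorted elements (fun k => pvKey adj k) with hrem
    set ord := PySem.List.dedup rem with hord
    have hnd : ord.Nodup := PySem.Set.nodup_ofList _
    have hrev := pvRev_count adj ord hnd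
    have h3 : ∀ k ∈ ord,
        PySem.Dict.getD
          (ord.foldl (fun d k => PySem.Dict.insert d k (pvKey adj k)) PySem.Dict.empty) k 0
          = pvNew adj PySem.Set.empty k := by
      intro k hk
      rw [pvInit_getD (fun k => pvKey adj k) ord PySem.Dict.empty k hnd hk]
      unfold pvNew pvKey
      rw [show (fun m => !(PySem.Set.contains PySem.Set.empty m)) = (fun _ : Int => true) from
            funext (fun m => rfl),
          List.countP_true]
    have hT : (fun k : Int => !(decide (k ∈ ([] : List Int)))) = (fun _ : Int => true) := by
      funext k; simp
    have h2 : ord = ord.filter (fun k => !(decide (k ∈ ([] : List Int)))) := by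
      rw [hT, List.filter_true]
    have h5 : PySem.List.dedup (rem.filter (fun k => !(decide (k ∈ ([] : List Int))))) = ord := by
      rw [hT, List.filter_true]
    have hmain := pvMain adj ord
      (ord.foldl
        (fun r k =>
          (pvAdj adj k).foldl (fun r m => PySem.Dict.modify r m [] (fun l => l ++ [k])) r)
        PySem.Dict.empty)
      hnd (fun k m hk => hrev k m hk)
      (min target_size ((rem.length : Int))).toNat [] PySem.Set.empty PySem.Set.empty rem ord
      (ord.foldl (fun d k => PySem.Dict.insert d k (pvKey adj k)) PySem.Dict.empty)
      (fun x => rfl) h2 h5 h3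
    rw [hmain]
    have hle : ord.length ≤ rem.length := PySem.Set.length_ofList_le _
    have hfuel : min ((min target_size ((rem.length : Int))).toNat) ord.length
        = (min target_size ((ord.length : Int))).toNat := by
      omega
    rw [hfuel]
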